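-- pv_equiv track=rewrite | github.com/sunghj1118/algorithm | 백준/Silver/1309. 동물원/동물원.py | dp
-- ===== SOURCE A (Python) =====
-- def dp(n):
--     if n == 1:
--         return 3
--     if n == 2:
--         return 7
--
--
--     li = [0] * (n + 1)
--     li[0] = [2,3]
--     li[1] = [5,7]
--     li[2] = [12,17]
--
--     for i in range(3, n+1):
--         li[i] = [(li[i-1][0]+li[i-1][1]) % 9901,
--                  (li[i-1][0]*2+li[i-1][1]) % 9901]
--
--     return li[n-1][1]
-- ===== SOURCE B (Python) =====
-- def dp(n):
--     # Fast matrix exponentiation of the recurrence (a,b) -> (a+b, 2a+b) mod 9901.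
--     MOD = 9901
--
--     def mul(A, B):
--         a, b, c, d = A
--         e, f, g, h = B
--         return ((a * e + b * g) % MOD, (a * f + b * h) % MOD,
--                 (c * e + d * g) % MOD, (c * f + d * h) % MOD)
--
--     A = (1, 1, 2, 1)
--     R = (1, 0, 0, 1)
--     k = n - 1
--     while k > 0:
--         if k % 2 == 1:
--             R = mul(R, A)
--         A = mul(A, A)
--         k //= 2
--     c, d = R[2], R[3]
--     return (c * 2 + d * 3) % MOD
-- ===== Notes on version B (the rewrite author's own statement) =====
-- stated objective: faster
-- what changed: Replaces the O(n) DP list that stores every intermediate pair with binary matrix exponentiation of the 2x2 recurrence matrix mod 9901.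
-- outside the precondition, e.g. on dp(0): A raises IndexError, B returns 3
import Mathlib
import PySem

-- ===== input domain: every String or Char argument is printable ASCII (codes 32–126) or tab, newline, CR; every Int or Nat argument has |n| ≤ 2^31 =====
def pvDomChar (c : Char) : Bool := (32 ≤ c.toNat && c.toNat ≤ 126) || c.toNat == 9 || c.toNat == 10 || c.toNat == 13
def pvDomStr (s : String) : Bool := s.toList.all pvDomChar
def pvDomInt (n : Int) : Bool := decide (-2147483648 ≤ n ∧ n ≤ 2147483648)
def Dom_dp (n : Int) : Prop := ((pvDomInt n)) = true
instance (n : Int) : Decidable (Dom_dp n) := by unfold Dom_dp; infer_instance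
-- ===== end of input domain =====

-- B replaces A's O(n) DP list with O(log n) binary exponentiation of the 2x2 recurrence matrix mod 9901.

-- ===== PORT A =====
-- Python's `li = [0]*(n+1)` holds int placeholders that are overwritten with two-element
-- lists before any read; the never-read placeholder 0 is represented by the pair (0, 0).
def dp (n : Int) : Int :=
  if n = 1 then 3
  else if n = 2 then 7
  else
    let li : List (Int × Int) := List.replicate (n + 1).toNat (0, 0)
    let li := li.set 0 (2, 3)
    let li := li.set 1 (5, 7)
    let li := li.set 2 (12, 17)
    let li := (PySem.List.pyRange 3 (n + 1) 1).foldl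
      (fun li i =>
        let p := li.getD (i - 1).toNat (0, 0)
        li.set i.toNat
          (PySem.Int.mod (p.1 + p.2) 9901, PySem.Int.mod (p.1 * 2 + p.2) 9901)) li
    (li.getD (n - 1).toNat (0, 0)).2

-- ===== PORT B =====
-- mul(A, B): 2x2 matrix product mod 9901, matrices as 4-tuples (a, b, c, d) = [[a, b], [c, d]]
def dpMul (A B : Int × Int × Int × Int) : Int × Int × Int × Int :=
  match A, B with
  | (a, b, c, d), (e, f, g, h) =>
    (PySem.Int.mod (a * e + b * g) 9901, PySem.Int.mod (a * f + b * h) 9901,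
     PySem.Int.mod (c * e + d * g) 9901, PySem.Int.mod (c * f + d * h) 9901)

-- the `while k > 0` binary-powering loop of Source B, state (A, R, k)
def dpPowLoop (A R : Int × Int × Int × Int) (k : Int) : Int × Int × Int × Int :=
  if 0 < k then
    dpPowLoop (dpMul A A) (if PySem.Int.mod k 2 = 1 then dpMul R A else R)
      (PySem.Int.floordiv k 2)
  else R
termination_by k.toNat
decreasing_by
  simp only [PySem.Int.floordiv_eq_ediv_of_pos (by norm_num : (0:Int) < 2)]
  omega

def dp_alt (n : Int) : Int :=
  let R := dpPowLoop (1, 1, 2, 1) (1, 0, 0, 1) (n - 1)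
  PySem.Int.mod (R.2.2.1 * 2 + R.2.2.2 * 3) 9901

-- ===== PRECONDITION & SPEC =====
-- Python A raises IndexError for every n ≤ 0 (the placeholder list is too short for the seeds).
def Pre_dp (n : Int) : Prop := 1 ≤ n
instance (n : Int) : Decidable (Pre_dp n) := by unfold Pre_dp; infer_instance
def pvWitness_dp : Int := 5
def Spec_dp (n : Int) (out : Int) : Prop := out = dp_alt n
instance (n : Int) (out : Int) : Decidable (Spec_dp n out) := by unfold Spec_dp; infer_instance

-- ===== CLAIM (what is proved, stated in full; the proofs are below) =====
def Claim_equal_dp : Prop := ∀ (n : Int), Dom_dp n → Pre_dp n → Spec_dp n (dp n)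

-- ===== LEMMAS AND PROOFS =====

-- the one-step transition A's loop applies to the pair stored at the previous index
def zStep (p : Int × Int) : Int × Int :=
  (PySem.Int.mod (p.1 + p.2) 9901, PySem.Int.mod (p.1 * 2 + p.2) 9901)

def zIter (k : Nat) : Int × Int := zStep^[k] (2, 3)

-- the recurrence matrix over ZMod 9901
def zM : Matrix (Fin 2) (Fin 2) (ZMod 9901) := !![1, 1; 2, 1]

-- cast of a 4-tuple matrix into ZMod 9901
def zCast (A : Int × Int × Int × Int) : Matrix (Fin 2) (Fin 2) (ZMod 9901) :=
  !![(A.1 : ZMod 9901), (A.2.1 : ZMod 9901); (A.2.2.1 : ZMod 9901), (A.2.2.2 : ZMod 9901)]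

lemma pmod_eq (x : Int) : PySem.Int.mod x 9901 = x % 9901 :=
  PySem.Int.mod_eq_emod_of_pos (by norm_num)

lemma cast_pmod (x : Int) : ((PySem.Int.mod x 9901 : Int) : ZMod 9901) = (x : ZMod 9901) := by
  rw [pmod_eq]
  have h := ZMod.intCast_mod x 9901
  simpa using h

lemma cast_inj_9901 (x y : Int) (hx0 : 0 ≤ x) (hx : x < 9901) (hy0 : 0 ≤ y) (hy : y < 9901)
    (h : (x : ZMod 9901) = (y : ZMod 9901)) : x = y := by
  rw [ZMod.intCast_eq_intCast_iff'] at h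
  have hx' : x % (9901 : ℕ) = x := Int.emod_eq_of_lt hx0 (by exact_mod_cast hx)
  have hy' : y % (9901 : ℕ) = y := Int.emod_eq_of_lt hy0 (by exact_mod_cast hy)
  rw [hx', hy'] at h
  exact h

-- ---- A-side: the fold fills li[t] with zIter t for every t up to the last written index ----
lemma dp_fold_inv : ∀ (k : Nat) (lo : Int) (li : List (Int × Int)) (j : Nat),
    3 ≤ lo → lo = (j : Int) + 1 →
    lo + (k : Int) ≤ (li.length : Int) →
    (∀ t : Nat, t ≤ j → li.getD t (0, 0) = zIter t) →
    ∀ t : Nat, t ≤ j + k →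
      ((PySem.List.pyRange lo (lo + k) 1).foldl
        (fun li i =>
          let p := li.getD (i - 1).toNat (0, 0)
          li.set i.toNat
            (PySem.Int.mod (p.1 + p.2) 9901, PySem.Int.mod (p.1 * 2 + p.2) 9901)) li).getD
      t (0, 0) = zIter t := by
  intro k
  induction k with
  | zero =>
    intro lo li j _ _ _ hj t ht
    have := hj t (by omega)
    simpa [PySem.List.pyRange_one] using this
  | succ k ih =>
    intro lo li j h3 hlo hlen hj t ht
    have hcons : PySem.List.pyRange lo (lo + (k + 1 : Nat)) 1
        = lo :: PySem.List.pyRange (lo + 1) (lo + (k + 1 : Nat)) 1 := by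
      apply PySem.List.pyRange_one_cons
      push_cast; omega
    rw [hcons]
    simp only [List.foldl_cons]
    have hlo1 : (lo - 1).toNat = j := by omega
    have hlonat : lo.toNat = j + 1 := by omega
    have hstep : li.set lo.toNat
        (PySem.Int.mod ((li.getD (lo - 1).toNat (0, 0)).1 + (li.getD (lo - 1).toNat (0, 0)).2) 9901,
         PySem.Int.mod ((li.getD (lo - 1).toNat (0, 0)).1 * 2 + (li.getD (lo - 1).toNat (0, 0)).2) 9901)
        = li.set (j + 1) (zIter (j + 1)) := by
      rw [hlo1, hlonat, hj j (by omega)]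
      rw [show zIter (j + 1) = zStep (zIter j) from by
        simp [zIter, Function.iterate_succ_apply']]
      rfl
    rw [hstep]
    have hlen' : j + 1 < li.length := by omega
    have hmid : ∀ t : Nat, t ≤ j + 1 →
        (li.set (j + 1) (zIter (j + 1))).getD t (0, 0) = zIter t := by
      intro t ht'
      by_cases he : t = j + 1
      · subst he
        simp [List.getD_eq_getElem?_getD, List.getElem?_set_self hlen']
      · rw [List.getD_eq_getElem?_getD, List.getElem?_set_ne (by omega),
          ← List.getD_eq_getElem?_getD]
        exact hj t (by omega)
    have hrange : lo + ((k + 1 : Nat) : Int) = (lo + 1) + (k : Int) := by push_cast; omega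
    rw [hrange]
    exact ih (lo + 1) (li.set (j + 1) (zIter (j + 1))) (j + 1)
      (by omega) (by push_cast; omega)
      (by simp only [List.length_set]; push_cast at hlen ⊢; omega) hmid t (by omega)

lemma dp_eq_iter (n : Int) (h : 1 ≤ n) : dp n = (zIter (n - 1).toNat).2 := by
  by_cases h1 : n = 1
  · subst h1; decide
  by_cases h2 : n = 2
  · subst h2; decide
  have h3 : 3 ≤ n := by omega
  unfold dp
  rw [if_neg h1, if_neg h2]
  set li0 : List (Int × Int) :=
    ((((List.replicate (n + 1).toNat (0, 0)).set 0 (2, 3)).set 1 (5, 7)).set 2 (12, 17))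
    with hli0
  have hlen0 : li0.length = (n + 1).toNat := by simp [hli0]
  have hseed : ∀ t : Nat, t ≤ 2 → li0.getD t (0, 0) = zIter t := by
    intro t ht
    have hlenr : t < (List.replicate (n + 1).toNat ((0:Int), (0:Int))).length := by
      simp; omega
    interval_cases t
    · rw [hli0, List.getD_eq_getElem?_getD, List.getElem?_set_ne (by omega),
        List.getElem?_set_ne (by omega), List.getElem?_set_self (by simpa using hlenr)]
      decide
    · rw [hli0, List.getD_eq_getElem?_getD, List.getElem?_set_ne (by omega),
        List.getElem?_set_self (by simpa using hlenr)]
      decide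
    · rw [hli0, List.getD_eq_getElem?_getD,
        List.getElem?_set_self (by simpa using hlenr)]
      decide
  have hk : (3 : Int) + ((n - 2).toNat : Int) = n + 1 := by omega
  have hinv := dp_fold_inv (n - 2).toNat 3 li0 2 (by omega) (by norm_num)
    (by rw [hlen0]; omega) hseed (n - 1).toNat (by omega)
  rw [hk] at hinv
  exact congrArg Prod.snd hinv

-- ---- B-side: dpPowLoop computes zM ^ k ----
lemma zCast_mul (A B : Int × Int × Int × Int) :
    zCast (dpMul A B) = zCast A * zCast B := by
  obtain ⟨a, b, c, d⟩ := A
  obtain ⟨e, f, g, h⟩ := B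
  simp only [dpMul, zCast, Matrix.mul_fin_two, cast_pmod]
  push_cast
  rfl

lemma dpPow_eq : ∀ (k : Nat) (A R : Int × Int × Int × Int),
    zCast (dpPowLoop A R (k : Int)) = zCast R * (zCast A) ^ k := by
  intro k
  induction k using Nat.strong_induction_on with
  | _ k ih =>
    intro A R
    rw [dpPowLoop]
    by_cases hk : k = 0
    · subst hk; simp
    · have hkpos : 0 < (k : Int) := by omega
      rw [if_pos hkpos]
      have hdiv : PySem.Int.floordiv (k : Int) 2 = ((k / 2 : Nat) : Int) := by
        rw [PySem.Int.floordiv_eq_ediv_of_pos (by norm_num)]; omega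
      have hmod : PySem.Int.mod (k : Int) 2 = (k : Int) % 2 :=
        PySem.Int.mod_eq_emod_of_pos (by norm_num)
      rw [hdiv]
      rw [ih (k / 2) (by omega)]
      have hAA : zCast (dpMul A A) = zCast A * zCast A := zCast_mul A A
      by_cases hodd : k % 2 = 1
      · have : PySem.Int.mod (k : Int) 2 = 1 := by rw [hmod]; omega
        rw [if_pos this, zCast_mul, hAA, ← sq, ← pow_mul, mul_assoc, ← pow_succ']
        congr 1
        congr 1
        omega
      · have hm0 : k % 2 = 0 := by omega
        have : ¬ PySem.Int.mod (k : Int) 2 = 1 := by rw [hmod]; omega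
        rw [if_neg this, hAA, ← sq, ← pow_mul]
        congr 1
        congr 1
        omega

lemma zIter_entries : ∀ k : Nat,
    (((zIter k).1 : ZMod 9901) = (zM ^ k) 0 0 * 2 + (zM ^ k) 0 1 * 3) ∧
    (((zIter k).2 : ZMod 9901) = (zM ^ k) 1 0 * 2 + (zM ^ k) 1 1 * 3) := by
  intro k
  induction k with
  | zero =>
    constructor <;> simp [zIter]
  | succ k ih =>
    obtain ⟨ih1, ih2⟩ := ih
    have hs : zIter (k + 1) = zStep (zIter k) := by
      simp [zIter, Function.iterate_succ_apply']
    have hpow : zM ^ (k + 1) = zM * zM ^ k := pow_succ' zM k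
    have e00 : (zM * zM ^ k) 0 0 = (zM ^ k) 0 0 + (zM ^ k) 1 0 := by
      simp [zM, Matrix.mul_apply, Fin.sum_univ_two]
    have e01 : (zM * zM ^ k) 0 1 = (zM ^ k) 0 1 + (zM ^ k) 1 1 := by
      simp [zM, Matrix.mul_apply, Fin.sum_univ_two]
    have e10 : (zM * zM ^ k) 1 0 = 2 * (zM ^ k) 0 0 + (zM ^ k) 1 0 := by
      simp [zM, Matrix.mul_apply, Fin.sum_univ_two]
    have e11 : (zM * zM ^ k) 1 1 = 2 * (zM ^ k) 0 1 + (zM ^ k) 1 1 := by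
      simp [zM, Matrix.mul_apply, Fin.sum_univ_two]
    rw [hs, hpow]
    constructor
    · show (((zStep (zIter k)).1 : Int) : ZMod 9901) = _
      rw [show (zStep (zIter k)).1 = PySem.Int.mod ((zIter k).1 + (zIter k).2) 9901 from rfl]
      rw [cast_pmod, e00, e01]
      push_cast
      rw [ih1, ih2]; ring
    · show (((zStep (zIter k)).2 : Int) : ZMod 9901) = _
      rw [show (zStep (zIter k)).2 = PySem.Int.mod ((zIter k).1 * 2 + (zIter k).2) 9901 from rfl]
      rw [cast_pmod, e10, e11]
      push_cast
      rw [ih1, ih2]; ring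

lemma zIter_bounds (k : Nat) : 0 ≤ (zIter k).2 ∧ (zIter k).2 < 9901 := by
  cases k with
  | zero => decide
  | succ k =>
    have hs : zIter (k + 1) = zStep (zIter k) := by
      simp [zIter, Function.iterate_succ_apply']
    rw [hs]
    exact ⟨PySem.Int.mod_nonneg _ (by norm_num), PySem.Int.mod_lt _ (by norm_num)⟩

-- ===== VERDICT (by name: the statement is the Claim_ definition above) =====
theorem dp_spec : Claim_equal_dp := by
  intro n _ hpre
  unfold Pre_dp at hpre
  unfold Spec_dp
  have hm : n - 1 = (((n - 1).toNat : Nat) : Int) := by omega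
  set m := (n - 1).toNat with hmdef
  -- B side
  have hB : dp_alt n = PySem.Int.mod
      ((dpPowLoop (1, 1, 2, 1) (1, 0, 0, 1) ((m : Nat) : Int)).2.2.1 * 2 +
       (dpPowLoop (1, 1, 2, 1) (1, 0, 0, 1) ((m : Nat) : Int)).2.2.2 * 3) 9901 := by
    unfold dp_alt
    rw [← hm]
  set Q := dpPowLoop (1, 1, 2, 1) (1, 0, 0, 1) ((m : Nat) : Int) with hQ
  have hpow := dpPow_eq m (1, 1, 2, 1) (1, 0, 0, 1)
  have hI : zCast (1, 0, 0, 1) = 1 := by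
    simp [zCast, Matrix.one_fin_two]
  have hMcast : zCast (1, 1, 2, 1) = zM := by
    simp [zCast, zM]
  rw [hI, hMcast, one_mul, ← hQ] at hpow
  have hc : ((Q.2.2.1 : Int) : ZMod 9901) = (zM ^ m) 1 0 := by
    have := congrFun (congrFun hpow 1) 0
    simpa [zCast] using this
  have hd : ((Q.2.2.2 : Int) : ZMod 9901) = (zM ^ m) 1 1 := by
    have := congrFun (congrFun hpow 1) 1
    simpa [zCast] using this
  -- equal casts
  have hcast : ((dp n : Int) : ZMod 9901) = ((dp_alt n : Int) : ZMod 9901) := by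
    rw [dp_eq_iter n hpre, hB, cast_pmod, ← hmdef]
    push_cast
    rw [hc, hd, (zIter_entries m).2]
  -- bounds
  have hbA := zIter_bounds m
  have hA' : dp n = (zIter m).2 := dp_eq_iter n hpre
  have hbB : 0 ≤ dp_alt n ∧ dp_alt n < 9901 := by
    rw [hB]
    exact ⟨PySem.Int.mod_nonneg _ (by norm_num), PySem.Int.mod_lt _ (by norm_num)⟩
  apply cast_inj_9901 _ _ (by rw [hA']; exact hbA.1) (by rw [hA']; exact hbA.2)
    hbB.1 hbB.2 hcast
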